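-- pv_equiv track=rewrite | github.com/tgnhrkn/2048 | main.py | compress_board
-- ===== SOURCE A (Python) =====
-- def rot_right( arr ):
--   list_of_tuples = zip(*arr[::-1])
--   return [list(elem) for elem in list_of_tuples]
--
-- def compress( arr ):
--   a = []
--   c = 0
--   for i in arr:
--     if i is not None:
--       a.append(i)
--     else:
--       c = c + 1
--
--   for i in range(c):
--     a.append(None)
--
--   for i in range(len(a) - 1):
--     if a[i] is not None:
--       if a[i] == a[i+1]:
--         a[i] = a[i] * 2
--         a[i + 1] = None
--
--   a2 = []
--   c = 0
--   for i in a: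
--     if i is not None:
--       a2.append(i)
--     else:
--       c = c + 1
--
--   for i in range(c):
--     a2.append(None)
--
--   moved = a2 != arr
--   return (a2, moved)
--
-- def compress_board_h( brd ):
--   new_brd = [[], [], [], []]
--   moved = False
--   for i in range(len(brd)):
--     res = compress( brd[i] )
--     new_brd[i] = res[0]
--     moved = moved or res[1]
--   return (new_brd, moved)
--
-- def compress_board( brd, rots ):
--   rots = rots % 4
--   board = brd
--   for i in range(rots):
--     board = rot_right(board)
--   (board, moved) = compress_board_h(board)
--   for i in range(4 - rots):
--     board = rot_right(board)
--   return (board, moved)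
-- ===== SOURCE B (Python) =====
-- # B: each row is compressed by one fused greedy merge pass (filter out the empty
-- # cells, merge equal adjacent pairs, pad with None) instead of three separate
-- # compact/merge/compact passes; the board step is a plain comprehension.
--
-- def rot_right(arr):
--   list_of_tuples = zip(*arr[::-1])
--   return [list(elem) for elem in list_of_tuples]
--
-- def _merge(tight):
--   if len(tight) >= 2 and tight[0] == tight[1]:
--     return [tight[0] * 2] + _merge(tight[2:])
--   if tight:
--     return [tight[0]] + _merge(tight[1:])
--   return []
--
-- def _compress_row(arr):
--   out = _merge([x for x in arr if x is not None])
--   out = out + [None] * (len(arr) - len(out))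
--   return (out, out != arr)
--
-- def compress_board(brd, rots):
--   rots = rots % 4
--   board = brd
--   for _ in range(rots):
--     board = rot_right(board)
--   rows = [_compress_row(r) for r in board]
--   board = [r for r, _ in rows]
--   moved = any(m for _, m in rows)
--   for _ in range(4 - rots):
--     board = rot_right(board)
--   return (board, moved)
-- ===== Notes on version B (the rewrite author's own statement) =====
-- stated objective: simpler
-- what changed: Each row is compressed by one fused greedy merge (filter the non-None tiles, recursively merge equal adjacent pairs, pad with None) instead of A's three separate compact/merge/compact passes over an index-mutated list, and the board step is a plain comprehension instead of index assignment into a preallocated [[],[],[],[]]; …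
-- outside the precondition, e.g. on compress_board([[2]], 0): A returns ([], False), B returns ([[2]], False); on compress_board([[2, 2]], 0): A returns ([], True), B returns ([[4, None]], True)
import Mathlib
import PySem

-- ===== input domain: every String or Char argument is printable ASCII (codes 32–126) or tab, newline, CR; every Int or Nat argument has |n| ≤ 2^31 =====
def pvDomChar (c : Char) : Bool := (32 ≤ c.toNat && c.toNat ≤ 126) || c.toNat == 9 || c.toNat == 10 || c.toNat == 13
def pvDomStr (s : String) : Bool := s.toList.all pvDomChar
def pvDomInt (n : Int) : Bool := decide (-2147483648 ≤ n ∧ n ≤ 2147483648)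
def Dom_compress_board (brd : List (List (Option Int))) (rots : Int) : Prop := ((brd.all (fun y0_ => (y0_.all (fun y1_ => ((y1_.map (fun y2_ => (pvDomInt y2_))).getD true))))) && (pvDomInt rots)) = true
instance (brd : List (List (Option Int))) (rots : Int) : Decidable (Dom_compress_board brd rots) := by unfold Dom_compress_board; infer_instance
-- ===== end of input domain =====

-- B compresses each row with one fused greedy merge pass (filter, recursive merge of
-- equal adjacent pairs, pad) instead of A's compact/merge/compact three passes, and
-- maps it over the rotated board's rows instead of index-assigning into a preallocated
-- [[],[],[],[]]; Pre_ restricts to the game's natural domain, where A's hard-wired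
-- 4x4 geometry is consistent with the input.


-- ===== PORT A =====
-- zip(*ls): take the heads of all lists while every list is nonempty (exact for
-- Python's zip); fuel = length of the first list bounds the number of steps.
def pvZipGo {α : Type} : Nat → List (List α) → List (List α)
  | 0, _ => []
  | n + 1, ls =>
    if ls ≠ [] ∧ ls.all (fun l => !l.isEmpty) then
      ls.filterMap List.head? :: pvZipGo n (ls.map List.tail)
    else []

def pvZipStar {α : Type} (ls : List (List α)) : List (List α) :=
  pvZipGo (ls.headD []).length ls

-- rot_right: zip(*arr[::-1]); [list(elem) for elem in …] is the identity on lists.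
-- (This helper is textually identical in A and in B; both ports share it.)
def rot_rightP (arr : List (List (Option Int))) : List (List (Option Int)) :=
  pvZipStar arr.reverse

-- compress: A's three passes (compact+count, in-place pair merge over indices, compact+pad).
-- The merge writes a[i] = a[i]*2 then a[i+1] = None; both indices are always in range,
-- so the match on the two pyGet? reads is exact (no IndexError possible here).
def pvCompressA (arr : List (Option Int)) : List (Option Int) × Bool :=
  let ac := arr.foldl
      (fun (s : List (Option Int) × Int) i =>
        (if i ≠ none then s.1 ++ [i] else s.1, if i ≠ none then s.2 else s.2 + 1)) ([], 0)
  let a1 := (PySem.List.pyRange 0 ac.2 1).foldl (fun l _ => l ++ [none]) ac.1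
  let a2 := (PySem.List.pyRange 0 ((a1.length : Int) - 1) 1).foldl
      (fun (l : List (Option Int)) (i : Int) =>
        match PySem.List.pyGet? l i, PySem.List.pyGet? l (i + 1) with
        | some x, some y =>
          if x ≠ none then
            if x = y then PySem.List.pySetD (PySem.List.pySetD l i (x.map (· * 2))) (i + 1) none
            else l
          else l
        | _, _ => l) a1
  let bc := a2.foldl
      (fun (s : List (Option Int) × Int) i =>
        (if i ≠ none then s.1 ++ [i] else s.1, if i ≠ none then s.2 else s.2 + 1)) ([], 0)
  let a3 := (PySem.List.pyRange 0 bc.2 1).foldl (fun l _ => l ++ [none]) bc.1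
  (a3, decide (a3 ≠ arr))

-- compress_board_h: new_brd = [[],[],[],[]]; new_brd[i] = compress(brd[i])[0]; moved or-fold.
-- pySetD is exact for new_brd[i] = … whenever i < 4 (the IndexError case is excluded by Pre_).
def pvCompressBoardH (brd : List (List (Option Int))) : List (List (Option Int)) × Bool :=
  (PySem.List.pyRange 0 (brd.length : Int) 1).foldl
    (fun (s : List (List (Option Int)) × Bool) i =>
      match PySem.List.pyGet? brd i with
      | some row => (PySem.List.pySetD s.1 i (pvCompressA row).1, s.2 || (pvCompressA row).2)
      | none => s)
    ([[], [], [], []], false)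

def compress_board (brd : List (List (Option Int))) (rots : Int) : List (List (Option Int)) × Bool :=
  let m := PySem.Int.mod rots 4
  let board := (PySem.List.pyRange 0 m 1).foldl (fun b _ => rot_rightP b) brd
  let res := pvCompressBoardH board
  let board2 := (PySem.List.pyRange 0 (4 - m) 1).foldl (fun b _ => rot_rightP b) res.1
  (board2, res.2)

-- ===== PORT B =====
-- _merge: recursive greedy pair merge over the tight (no-None) row
def pvMergeScan : List (Option Int) → List (Option Int)
  | x :: y :: t => if x = y then x.map (· * 2) :: pvMergeScan t else x :: pvMergeScan (y :: t)
  | l => l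

def pvCompressRowB (arr : List (Option Int)) : List (Option Int) × Bool :=
  let out := pvMergeScan (arr.filter (fun o => decide (o ≠ none)))
  let out2 := out ++ List.replicate (arr.length - out.length) none
  (out2, decide (out2 ≠ arr))

def compress_board_alt (brd : List (List (Option Int))) (rots : Int) : List (List (Option Int)) × Bool :=
  let m := PySem.Int.mod rots 4
  let board := (PySem.List.pyRange 0 m 1).foldl (fun b _ => rot_rightP b) brd
  let rows := board.map pvCompressRowB
  let newBoard := rows.map Prod.fst
  let moved := rows.any Prod.snd
  let board2 := (PySem.List.pyRange 0 (4 - m) 1).foldl (fun b _ => rot_rightP b) newBoard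
  (board2, moved)

-- ===== PRECONDITION & SPEC =====
-- Pre_ excludes (a) the inputs on which A raises IndexError in compress_board_h (the
-- board reaching it after rots % 4 rot_rights has more than 4 rows), and (b) inputs
-- outside the game's natural 4x4 domain where A's hard-wired geometry garbles the value:
-- boards whose rotated form is nonempty with no empty row but has fewer than 4 rows,
-- on which A's preallocated [[],[],[],[]] pads the compressed board with empty rows
-- that collapse A's whole result to [] under the reverse rotations.
def Pre_compress_board (brd : List (List (Option Int))) (rots : Int) : Prop :=
  (if PySem.Int.mod rots 4 = 0 then brd.length ≤ 4
   else if PySem.Int.mod rots 4 = 2 then brd = [] ∨ (∃ r ∈ brd, r.length = 0) ∨ brd.length ≤ 4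
   else brd = [] ∨ ∃ r ∈ brd, r.length ≤ 4) ∧
  ¬ (brd ≠ [] ∧ (∀ r ∈ brd, r ≠ []) ∧
      (if PySem.Int.mod rots 4 = 0 ∨ PySem.Int.mod rots 4 = 2
       then brd.length < 4 else ∃ r ∈ brd, r.length < 4))
instance (brd : List (List (Option Int))) (rots : Int) : Decidable (Pre_compress_board brd rots) := by unfold Pre_compress_board; infer_instance

def pvWitness_compress_board : List (List (Option Int)) × Int :=
  ([[some 2, some 2, none, some 4], [none, none, none, none],
    [some 2, none, some 2, none], [some 4, some 4, some 2, some 2]], 1)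

def Spec_compress_board (brd : List (List (Option Int))) (rots : Int) (out : List (List (Option Int)) × Bool) : Prop := out = compress_board_alt brd rots
instance (brd : List (List (Option Int))) (rots : Int) (out : List (List (Option Int)) × Bool) : Decidable (Spec_compress_board brd rots out) := by unfold Spec_compress_board; infer_instance

-- ===== CLAIM (what is proved, stated in full; the proofs are below) =====
def Claim_equal_compress_board : Prop := ∀ (brd : List (List (Option Int))) (rots : Int), Dom_compress_board brd rots → Pre_compress_board brd rots → Spec_compress_board brd rots (compress_board brd rots)

-- ===== LEMMAS AND PROOFS =====
set_option maxHeartbeats 1000000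

theorem pvZipStar_eq {α : Type} (ls : List (List α)) :
    pvZipStar ls = if ls ≠ [] ∧ ls.all (fun l => !l.isEmpty) then
      ls.filterMap List.head? :: pvZipStar (ls.map List.tail) else [] := by
  cases ls with
  | nil => simp [pvZipStar, pvZipGo]
  | cons x t =>
    cases x with
    | nil => simp [pvZipStar, pvZipGo, List.all_cons]
    | cons a b => rfl

-- A's in-place merge loop, as structural recursion on the unprocessed suffix
def pvMergedRec : List (Option Int) → List (Option Int)
  | x :: y :: t =>
    if x ≠ none ∧ x = y then x.map (· * 2) :: none :: pvMergedRec t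
    else x :: pvMergedRec (y :: t)
  | l => l

theorem pvMergedRec_length (l : List (Option Int)) : (pvMergedRec l).length = l.length := by
  induction l using pvMergedRec.induct with
  | case1 x y t h ih => rw [pvMergedRec, if_pos h]; simp [ih]
  | case2 x y t h ih => rw [pvMergedRec, if_neg h]; simp at ih ⊢; omega
  | case3 l h1 => cases l with
    | nil => rfl
    | cons a t => cases t with
      | nil => rfl
      | cons b t2 => exact absurd rfl (h1 a b t2)

theorem pvMergedRec_all_none (l : List (Option Int)) (h : ∀ o ∈ l, o = none) :
    pvMergedRec l = l := by
  induction l using pvMergedRec.induct with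
  | case1 x y t hc ih => simp at h; simp [h.1] at hc
  | case2 x y t hc ih =>
    rw [pvMergedRec, if_neg hc, ih (by intro o ho; exact h o (List.mem_cons_of_mem x ho))]
  | case3 l h1 => cases l with
    | nil => rfl
    | cons a t => cases t with
      | nil => rfl
      | cons b t2 => exact absurd rfl (h1 a b t2)

theorem pvMergeScan_length_le (t : List (Option Int)) : (pvMergeScan t).length ≤ t.length := by
  induction t using pvMergeScan.induct with
  | case1 y t ih => rw [pvMergeScan, if_pos rfl]; simp at ih ⊢; omega
  | case2 x y t h ih => rw [pvMergeScan, if_neg h]; simp at ih ⊢; omega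
  | case3 l h1 => cases l with
    | nil => simp [pvMergeScan]
    | cons a t => cases t with
      | nil => simp [pvMergeScan]
      | cons b t2 => exact absurd rfl (h1 a b t2)

theorem pvMergedRec_filter (t : List (Option Int)) : ∀ k : Nat, (∀ o ∈ t, o ≠ none) →
    (pvMergedRec (t ++ List.replicate k none)).filter (fun o => decide (o ≠ none)) = pvMergeScan t := by
  induction t using pvMergeScan.induct with
  | case1 y t ih =>
    intro k h
    have hy : y ≠ none := h y (by simp)
    obtain ⟨v, rfl⟩ := Option.ne_none_iff_exists'.mp hy
    simp only [List.cons_append]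
    rw [pvMergedRec, if_pos ⟨hy, rfl⟩, pvMergeScan, if_pos rfl]
    rw [List.filter_cons_of_pos (by simp)]
    rw [List.filter_cons_of_neg (by simp)]
    rw [ih k (fun o ho => h o (by simp [ho]))]
  | case2 x y t hxy ih =>
    intro k h
    have hx : x ≠ none := h x (by simp)
    simp only [List.cons_append]
    rw [pvMergedRec, if_neg (by rintro ⟨-, rfl⟩; exact hxy rfl), pvMergeScan, if_neg hxy]
    rw [List.filter_cons_of_pos (by simpa using hx)]
    have := ih k (fun o ho => h o (by simp at ho ⊢; tauto))
    simp only [List.cons_append] at this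
    rw [this]
  | case3 l h1 =>
    cases l with
    | nil =>
      intro k h
      simp only [List.nil_append]
      rw [pvMergedRec_all_none _ (by simp), show pvMergeScan [] = [] from rfl]
      simp
    | cons a t => cases t with
      | nil =>
        intro k h
        have ha : a ≠ none := h a (by simp)
        cases k with
        | zero => simp [pvMergedRec, pvMergeScan, ha]
        | succ k2 =>
          simp only [List.cons_append, List.nil_append, List.replicate_succ]
          rw [pvMergedRec, if_neg (by rintro ⟨h1, h2⟩; exact h1 h2)]
          rw [pvMergedRec_all_none _ (by simp)]
          simp [pvMergeScan, ha]
      | cons b t2 => exact absurd rfl (h1 a b t2)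

theorem pvMergeFold (rest : List (Option Int)) : ∀ done : List (Option Int),
    (PySem.List.pyRange (done.length : Int) ((done.length : Int) + rest.length - 1) 1).foldl
      (fun (l : List (Option Int)) (i : Int) =>
        match PySem.List.pyGet? l i, PySem.List.pyGet? l (i + 1) with
        | some x, some y =>
          if x ≠ none then
            if x = y then PySem.List.pySetD (PySem.List.pySetD l i (x.map (· * 2))) (i + 1) none
            else l
          else l
        | _, _ => l) (done ++ rest) = done ++ pvMergedRec rest := by
  induction rest using pvMergedRec.induct with
  | case1 x y t hc ih =>
    intro done
    rw [PySem.List.pyRange_one_cons (by simp; omega)]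
    rw [List.foldl_cons]
    have hget1 : PySem.List.pyGet? (done ++ x :: y :: t) (done.length : Int) = some x :=
      PySem.List.pyGet?_append_length _ _ _
    have hget2 : PySem.List.pyGet? (done ++ x :: y :: t) ((done.length : Int) + 1) = some y := by
      have : done ++ x :: y :: t = (done ++ [x]) ++ y :: t := by simp
      rw [this]
      have hlen : ((done.length : Int) + 1) = (((done ++ [x]).length : Int)) := by simp
      rw [hlen]
      exact PySem.List.pyGet?_append_length _ _ _
    rw [pvMergedRec, if_pos hc]
    simp only [hget1, hget2]
    rw [if_pos hc.1, if_pos hc.2]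
    have hset : PySem.List.pySetD (PySem.List.pySetD (done ++ x :: y :: t) (done.length : Int) (x.map (· * 2))) ((done.length : Int) + 1) none
        = done ++ x.map (· * 2) :: none :: t := by
      rw [PySem.List.pySetD_natCast]
      rw [List.set_append_right _ _ (le_refl _)]
      simp only [Nat.sub_self, List.set_cons_zero]
      have : (done.length : Int) + 1 = ((done.length + 1 : Nat) : Int) := by push_cast; ring
      rw [this, PySem.List.pySetD_natCast]
      rw [List.set_append_right _ _ (by omega)]
      simp
    rw [hset]
    cases t with
    | nil =>
      rw [PySem.List.pyRange_one_eq_nil (by simp; omega)]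
      simp [pvMergedRec]
    | cons c t2 =>
      rw [PySem.List.pyRange_one_cons (by simp; omega)]
      rw [List.foldl_cons]
      have e1 : done ++ x.map (· * 2) :: none :: c :: t2 = (done ++ [x.map (· * 2)]) ++ none :: c :: t2 := by simp
      have hga : PySem.List.pyGet? (done ++ x.map (· * 2) :: none :: c :: t2) ((done.length : Int) + 1) = some none := by
        rw [e1]
        have hlen : ((done.length : Int) + 1) = (((done ++ [x.map (· * 2)]).length : Int)) := by simp
        rw [hlen]; exact PySem.List.pyGet?_append_length _ _ _
      have hgb : PySem.List.pyGet? (done ++ x.map (· * 2) :: none :: c :: t2) ((done.length : Int) + 1 + 1) = some c := by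
        have e2 : done ++ x.map (· * 2) :: none :: c :: t2 = (done ++ [x.map (· * 2), none]) ++ c :: t2 := by simp
        rw [e2]
        have hlen : ((done.length : Int) + 1 + 1) = (((done ++ [x.map (· * 2), none]).length : Int)) := by simp; ring
        rw [hlen]; exact PySem.List.pyGet?_append_length _ _ _
      simp only [hga, hgb]
      rw [if_neg (by simp)]
      have e3 : done ++ x.map (· * 2) :: none :: c :: t2 = (done ++ [x.map (· * 2), none]) ++ c :: t2 := by simp
      have ih2 := ih (done ++ [x.map (· * 2), none])
      have hlen2 : (((done ++ [x.map (· * 2), none]).length : Int)) = (done.length : Int) + 1 + 1 := by simp; ring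
      rw [hlen2] at ih2
      have hend : (done.length : Int) + 1 + 1 + ((c :: t2).length : Int) - 1 = (done.length : Int) + ((x :: y :: c :: t2).length : Int) - 1 := by simp; ring
      rw [hend] at ih2
      rw [e3, ih2]
      simp
  | case2 x y t hc ih =>
    intro done
    rw [PySem.List.pyRange_one_cons (by simp; omega)]
    rw [List.foldl_cons]
    have hget1 : PySem.List.pyGet? (done ++ x :: y :: t) (done.length : Int) = some x :=
      PySem.List.pyGet?_append_length _ _ _
    have hget2 : PySem.List.pyGet? (done ++ x :: y :: t) ((done.length : Int) + 1) = some y := by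
      have e : done ++ x :: y :: t = (done ++ [x]) ++ y :: t := by simp
      rw [e]
      have hlen : ((done.length : Int) + 1) = (((done ++ [x]).length : Int)) := by simp
      rw [hlen]
      exact PySem.List.pyGet?_append_length _ _ _
    rw [pvMergedRec, if_neg hc]
    simp only [hget1, hget2]
    have hstep : (if x ≠ none then if x = y then PySem.List.pySetD (PySem.List.pySetD (done ++ x :: y :: t) (done.length : Int) (x.map (· * 2))) ((done.length : Int) + 1) none else done ++ x :: y :: t else done ++ x :: y :: t) = done ++ x :: y :: t := by
      by_cases h1 : x = none
      · rw [if_neg (by simp [h1])]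
      · rw [if_pos h1, if_neg (fun h2 => hc ⟨h1, h2⟩)]
    rw [hstep]
    have e : done ++ x :: y :: t = (done ++ [x]) ++ y :: t := by simp
    have ih2 := ih (done ++ [x])
    have hlen2 : (((done ++ [x]).length : Int)) = (done.length : Int) + 1 := by simp
    rw [hlen2] at ih2
    have hend : (done.length : Int) + 1 + ((y :: t).length : Int) - 1 = (done.length : Int) + ((x :: y :: t).length : Int) - 1 := by simp; ring
    rw [hend] at ih2
    rw [e, ih2]
    simp
  | case3 l h1 =>
    intro done
    cases l with
    | nil =>
      rw [PySem.List.pyRange_one_eq_nil (by simp)]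
      simp [pvMergedRec]
    | cons a t => cases t with
      | nil =>
        rw [PySem.List.pyRange_one_eq_nil (by simp)]
        simp [pvMergedRec]
      | cons b t2 => exact absurd rfl (h1 a b t2)

theorem pvZipStar_nil {α : Type} : pvZipStar ([] : List (List α)) = [] := by
  rw [pvZipStar_eq]; simp

theorem pvZipStar_of_mem_nil {α : Type} (ls : List (List α)) (h : ∃ r ∈ ls, r = []) :
    pvZipStar ls = [] := by
  rw [pvZipStar_eq]
  rw [if_neg]
  rintro ⟨h1, h2⟩
  obtain ⟨r, hr, rfl⟩ := h
  simp [List.all_eq_true] at h2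
  exact h2 [] hr rfl

theorem pvFilterMapHeadLen {α : Type} (ls : List (List α)) (h : ∀ l ∈ ls, l ≠ []) :
    (ls.filterMap List.head?).length = ls.length := by
  induction ls with
  | nil => simp
  | cons a t ih =>
    cases a with
    | nil => exact absurd rfl (h [] (by simp))
    | cons x b =>
      simp only [List.filterMap_cons, List.head?_cons, List.length_cons]
      simp [ih (fun l hl => h l (by simp [hl]))]

theorem pvZipGo_row_length {α : Type} (n : Nat) :
    ∀ (ls : List (List α)), ∀ row ∈ pvZipGo n ls, row.length = ls.length := by
  induction n with
  | zero => intro ls row hrow; simp [pvZipGo] at hrow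
  | succ n ih =>
    intro ls row hrow
    rw [pvZipGo] at hrow
    by_cases h : ls ≠ [] ∧ ls.all (fun l => !l.isEmpty)
    · rw [if_pos h] at hrow
      rcases List.mem_cons.mp hrow with rfl | hmem
      · obtain ⟨h1, h2⟩ := h
        simp [List.all_eq_true] at h2
        exact pvFilterMapHeadLen ls (fun l hl hnil => (h2 l hl) (by simp [hnil]))
      · have := ih (ls.map List.tail) row hmem
        simpa using this
    · rw [if_neg h] at hrow; simp at hrow

theorem pvZipStar_row_length {α : Type} (ls : List (List α)) :
    ∀ row ∈ pvZipStar ls, row.length = ls.length :=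
  pvZipGo_row_length _ ls

theorem pvZipGo_length_le {α : Type} (n : Nat) :
    ∀ (ls : List (List α)), ∀ row ∈ ls, (pvZipGo n ls).length ≤ row.length := by
  induction n with
  | zero => intro ls row hrow; simp [pvZipGo]
  | succ n ih =>
    intro ls row hrow
    rw [pvZipGo]
    by_cases h : ls ≠ [] ∧ ls.all (fun l => !l.isEmpty)
    · rw [if_pos h]
      have hne : row ≠ [] := by
        obtain ⟨h1, h2⟩ := h
        simp [List.all_eq_true] at h2
        intro hr
        exact (h2 row hrow) (by simp [hr])
      have := ih (ls.map List.tail) row.tail (List.mem_map_of_mem hrow)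
      cases row with
      | nil => exact absurd rfl hne
      | cons a b => simpa using this
    · rw [if_neg h]; simp

theorem pvZipStar_length_le {α : Type} (ls : List (List α)) :
    ∀ row ∈ ls, (pvZipStar ls).length ≤ row.length :=
  pvZipGo_length_le _ ls

theorem pvZipGo_length_ge {α : Type} (k : Nat) :
    ∀ (n : Nat) (ls : List (List α)), ls ≠ [] → (∀ r ∈ ls, k ≤ r.length) → k ≤ n →
      k ≤ (pvZipGo n ls).length := by
  induction k with
  | zero => intro n ls _ _ _; omega
  | succ k ih =>
    intro n ls hne hlen hkn
    cases n with
    | zero => omega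
    | succ m =>
      rw [pvZipGo, if_pos]
      · simp only [List.length_cons]
        have : k ≤ (pvZipGo m (ls.map List.tail)).length := by
          apply ih m
          · simpa using hne
          · intro r hr
            obtain ⟨r0, hr0, rfl⟩ := List.mem_map.mp hr
            have := hlen r0 hr0
            simp only [List.length_tail]
            omega
          · omega
        omega
      · refine ⟨hne, ?_⟩
        rw [List.all_eq_true]
        intro l hl
        have := hlen l hl
        simp
        intro h0
        rw [h0] at this; simp at this
  
theorem pvZipStar_length_ge {α : Type} (k : Nat) (ls : List (List α)) (hne : ls ≠ [])
    (hlen : ∀ r ∈ ls, k ≤ r.length) : k ≤ (pvZipStar ls).length := by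
  apply pvZipGo_length_ge k _ ls hne hlen
  cases ls with
  | nil => exact absurd rfl hne
  | cons x t => exact hlen x (by simp)

theorem pvPass (l : List (Option Int)) :
    l.foldl (fun (s : List (Option Int) × Int) i =>
        (if i ≠ none then s.1 ++ [i] else s.1, if i ≠ none then s.2 else s.2 + 1)) ([], 0)
      = (l.filter (fun o => decide (o ≠ none)), (l.countP (fun o => decide (o = none)) : Int)) := by
  rw [PySem.List.foldl_prod_mk (f := fun (acc : List (Option Int)) i => if i ≠ none then acc ++ [i] else acc)
       (g := fun (acc : Int) i => if i ≠ none then acc else acc + 1)]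
  congr 1
  · exact PySem.List.foldl_append_ite_eq_filter (fun o => o ≠ none) l []
  · have : ∀ acc : Int, l.foldl (fun (acc : Int) i => if i ≠ none then acc else acc + 1) acc
        = l.foldl (fun (acc : Int) i => if i = none then acc + 1 else acc) acc := by
      intro acc
      apply PySem.List.foldl_congr_mem
      intro acc x hx
      by_cases h : x = none <;> simp [h]
    rw [this]
    have := PySem.List.foldl_ite_add_one (fun o => o = none) l 0
    simpa using this

theorem pvCountSplit (l : List (Option Int)) :
    l.countP (fun o => decide (o = none)) + (l.filter (fun o => decide (o ≠ none))).length = l.length := by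
  induction l with
  | nil => simp
  | cons a t ih =>
    rcases a with _ | v
    · rw [List.countP_cons, List.filter_cons]
      norm_num at ih ⊢
      omega
    · rw [List.countP_cons, List.filter_cons]
      simp only [decide_not, List.length_cons] at ih ⊢
      rw [if_neg (by simp), if_pos (by simp)]
      simp only [List.length_cons]
      omega

theorem pvPad (l0 : List (Option Int)) (c : Nat) :
    (PySem.List.pyRange 0 (c : Int) 1).foldl (fun l _ => l ++ [none]) l0 = l0 ++ List.replicate c none := by
  have := PySem.List.foldl_append_singleton_eq_map (fun (_ : Int) => (none : Option Int)) (PySem.List.pyRange 0 (c : Int) 1) l0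
  rw [this, List.map_const']
  congr 1
  rw [PySem.List.length_pyRange_one]
  simp

theorem pvRowEq (arr : List (Option Int)) : pvCompressA arr = pvCompressRowB arr := by
  simp only [pvCompressA, pvCompressRowB, pvPass]
  have hS : ∀ o ∈ arr.filter (fun o => decide (o ≠ none)), o ≠ none := by
    intro o ho
    simpa using (List.of_mem_filter ho)
  set S := arr.filter (fun o => decide (o ≠ none)) with hSdef
  set K := arr.countP (fun o => decide (o = none)) with hKdef
  have hpad1 : (PySem.List.pyRange 0 (K : Int) 1).foldl (fun l _ => l ++ [none]) S = S ++ List.replicate K none := pvPad S K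
  rw [hpad1]
  have hmf := pvMergeFold (S ++ List.replicate K none) []
  simp only [List.nil_append, List.length_nil, Nat.cast_zero, zero_add] at hmf
  have hlen : ((S ++ List.replicate K none).length : Int) = (S.length : Int) + K := by simp
  rw [hlen] at hmf ⊢
  rw [hmf]
  set A2 := pvMergedRec (S ++ List.replicate K none) with hA2
  have hfil : A2.filter (fun o => decide (o ≠ none)) = pvMergeScan S := by
    rw [hA2]; exact pvMergedRec_filter S K hS
  rw [hfil]
  have hK2 : A2.countP (fun o => decide (o = none)) = arr.length - (pvMergeScan S).length := by
    have h1 := pvCountSplit A2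
    have h2 : A2.length = S.length + K := by
      rw [hA2, pvMergedRec_length]; simp
    have h3 := pvCountSplit arr
    rw [← hSdef, ← hKdef] at h3
    rw [hfil] at h1
    have h4 : (pvMergeScan S).length ≤ S.length := pvMergeScan_length_le S
    omega
  rw [hK2, pvPad]

theorem pvMid (board : List (List (Option Int))) (h : board.length ≤ 4) :
    pvCompressBoardH board =
      ((board.map pvCompressRowB).map Prod.fst ++ List.replicate (4 - board.length) ([] : List (Option Int)),
       (board.map pvCompressRowB).any Prod.snd) := by
  match board, h with
  | [], _ => simp [pvCompressBoardH]
  | [a], _ =>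
    rw [pvCompressBoardH, show (([a] : List (List (Option Int))).length : Int) = 1 by simp,
        show PySem.List.pyRange 0 1 1 = [0] by decide]
    show ([(pvCompressA a).1, [], [], []], false || (pvCompressA a).2) = _
    simp [pvRowEq]
  | [a, b], _ =>
    rw [pvCompressBoardH, show (([a,b] : List (List (Option Int))).length : Int) = 2 by simp,
        show PySem.List.pyRange 0 2 1 = [0, 1] by decide]
    show ([(pvCompressA a).1, (pvCompressA b).1, [], []],
          false || (pvCompressA a).2 || (pvCompressA b).2) = _
    simp [pvRowEq]
  | [a, b, c], _ =>
    rw [pvCompressBoardH, show (([a,b,c] : List (List (Option Int))).length : Int) = 3 by simp,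
        show PySem.List.pyRange 0 3 1 = [0, 1, 2] by decide]
    show ([(pvCompressA a).1, (pvCompressA b).1, (pvCompressA c).1, []],
          false || (pvCompressA a).2 || (pvCompressA b).2 || (pvCompressA c).2) = _
    simp [pvRowEq, Bool.or_assoc]
  | [a, b, c, d], _ =>
    rw [pvCompressBoardH, show (([a,b,c,d] : List (List (Option Int))).length : Int) = 4 by simp,
        show PySem.List.pyRange 0 4 1 = [0, 1, 2, 3] by decide]
    show ([(pvCompressA a).1, (pvCompressA b).1, (pvCompressA c).1, (pvCompressA d).1],
          false || (pvCompressA a).2 || (pvCompressA b).2 || (pvCompressA c).2 || (pvCompressA d).2) = _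
    simp [pvRowEq, Bool.or_assoc]
  | a :: b :: c :: d :: e :: t, h =>
    exact absurd h (by simp)

-- "good" boards: nonempty with no empty row (rot_right preserves this; otherwise rot_right kills the board)
def pvGoodB (b : List (List (Option Int))) : Prop := b ≠ [] ∧ ∀ r ∈ b, r ≠ []

theorem pvRotLe (brd : List (List (Option Int))) (r : List (Option Int)) (hr : r ∈ brd) :
    (rot_rightP brd).length ≤ r.length :=
  pvZipStar_length_le brd.reverse r (List.mem_reverse.mpr hr)

theorem pvRotNil : rot_rightP ([] : List (List (Option Int))) = [] := by
  rw [rot_rightP]; simp [pvZipStar_nil]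

theorem pvRotMemNil (brd : List (List (Option Int))) (h : ∃ r ∈ brd, r = []) :
    rot_rightP brd = [] := by
  rw [rot_rightP]
  apply pvZipStar_of_mem_nil
  obtain ⟨r, hr, rfl⟩ := h
  exact ⟨[], List.mem_reverse.mpr hr, rfl⟩

theorem pvRotDead (brd : List (List (Option Int))) (h : ¬ pvGoodB brd) :
    rot_rightP brd = [] := by
  unfold pvGoodB at h
  push_neg at h
  by_cases hb : brd = []
  · rw [hb]; exact pvRotNil
  · obtain ⟨r, hr, hre⟩ := h hb
    exact pvRotMemNil brd ⟨r, hr, hre⟩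

theorem pvRotRowLen (brd : List (List (Option Int))) :
    ∀ row ∈ rot_rightP brd, row.length = brd.length := by
  intro row hrow
  have := pvZipStar_row_length brd.reverse row hrow
  simpa using this

theorem pvRotGe (brd : List (List (Option Int))) (k : Nat) (hne : brd ≠ [])
    (h : ∀ r ∈ brd, k ≤ r.length) : k ≤ (rot_rightP brd).length := by
  rw [rot_rightP]
  apply pvZipStar_length_ge
  · simpa using hne
  · intro r hr; exact h r (List.mem_reverse.mp hr)

theorem pvRot2 (b : List (List (Option Int))) (hb : b.length ≤ 4) :
    (rot_rightP (rot_rightP b)).length ≤ 4 := by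
  cases hc : rot_rightP b with
  | nil => rw [pvRotNil]; simp
  | cons r0 rest =>
    have h1 : r0.length = b.length := pvRotRowLen b r0 (by rw [hc]; exact List.mem_cons_self)
    have h2 := pvRotLe (r0 :: rest) r0 List.mem_cons_self
    omega

theorem pvRotLen (brd : List (List (Option Int))) (rots : Int)
    (h : if PySem.Int.mod rots 4 = 0 then brd.length ≤ 4
     else if PySem.Int.mod rots 4 = 2 then brd = [] ∨ (∃ r ∈ brd, r.length = 0) ∨ brd.length ≤ 4
     else brd = [] ∨ ∃ r ∈ brd, r.length ≤ 4) :
    ((PySem.List.pyRange 0 (PySem.Int.mod rots 4) 1).foldl (fun b _ => rot_rightP b) brd).length ≤ 4 := by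
  have hm0 : 0 ≤ PySem.Int.mod rots 4 := PySem.Int.mod_nonneg rots (by norm_num)
  have hm4 : PySem.Int.mod rots 4 < 4 := PySem.Int.mod_lt rots (by norm_num)
  have hcases : PySem.Int.mod rots 4 = 0 ∨ PySem.Int.mod rots 4 = 1 ∨
      PySem.Int.mod rots 4 = 2 ∨ PySem.Int.mod rots 4 = 3 := by omega
  rcases hcases with hm | hm | hm | hm <;> rw [hm] at h ⊢
  · rw [if_pos rfl] at h
    rw [show PySem.List.pyRange 0 0 1 = [] by decide]
    simpa using h
  · rw [if_neg (by norm_num), if_neg (by norm_num)] at h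
    rw [show PySem.List.pyRange 0 1 1 = [0] by decide]
    simp only [List.foldl_cons, List.foldl_nil]
    rcases h with rfl | ⟨r, hr, hle⟩
    · rw [pvRotNil]; simp
    · exact le_trans (pvRotLe brd r hr) hle
  · rw [if_neg (by norm_num), if_pos rfl] at h
    rw [show PySem.List.pyRange 0 2 1 = [0, 1] by decide]
    simp only [List.foldl_cons, List.foldl_nil]
    rcases h with rfl | ⟨r, hr, hlen⟩ | hlen
    · rw [pvRotNil, pvRotNil]; simp
    · rw [pvRotMemNil brd ⟨r, hr, List.length_eq_zero_iff.mp hlen⟩, pvRotNil]; simp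
    · exact pvRot2 brd hlen
  · rw [if_neg (by norm_num), if_neg (by norm_num)] at h
    rw [show PySem.List.pyRange 0 3 1 = [0, 1, 2] by decide]
    simp only [List.foldl_cons, List.foldl_nil]
    rcases h with rfl | ⟨r, hr, hle⟩
    · rw [pvRotNil, pvRotNil, pvRotNil]; simp
    · exact pvRot2 (rot_rightP brd) (le_trans (pvRotLe brd r hr) hle)

-- the excluded quirk region, in terms of the rotated board: it holds whenever the
-- board reaching the compress step is good but has fewer than 4 rows.
theorem pvGoodRot_imp_good (brd : List (List (Option Int)))
    (h : pvGoodB (rot_rightP brd)) : pvGoodB brd := by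
  by_contra hg
  rw [pvRotDead brd hg] at h
  exact h.1 rfl

theorem pvQuirk_of_rotated (brd : List (List (Option Int))) (rots : Int)
    (hG : pvGoodB ((PySem.List.pyRange 0 (PySem.Int.mod rots 4) 1).foldl (fun b _ => rot_rightP b) brd))
    (hlt : ((PySem.List.pyRange 0 (PySem.Int.mod rots 4) 1).foldl (fun b _ => rot_rightP b) brd).length < 4) :
    brd ≠ [] ∧ (∀ r ∈ brd, r ≠ []) ∧
      (if PySem.Int.mod rots 4 = 0 ∨ PySem.Int.mod rots 4 = 2
       then brd.length < 4 else ∃ r ∈ brd, r.length < 4) := by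
  have hm0 : 0 ≤ PySem.Int.mod rots 4 := PySem.Int.mod_nonneg rots (by norm_num)
  have hm4 : PySem.Int.mod rots 4 < 4 := PySem.Int.mod_lt rots (by norm_num)
  have hcases : PySem.Int.mod rots 4 = 0 ∨ PySem.Int.mod rots 4 = 1 ∨
      PySem.Int.mod rots 4 = 2 ∨ PySem.Int.mod rots 4 = 3 := by omega
  rcases hcases with hm | hm | hm | hm <;> rw [hm] at hG hlt ⊢
  · rw [show PySem.List.pyRange 0 0 1 = [] by decide] at hG hlt
    simp only [List.foldl_nil] at hG hlt
    exact ⟨hG.1, hG.2, by norm_num; exact hlt⟩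
  · rw [show PySem.List.pyRange 0 1 1 = [0] by decide] at hG hlt
    simp only [List.foldl_cons, List.foldl_nil] at hG hlt
    have hg : pvGoodB brd := pvGoodRot_imp_good brd hG
    refine ⟨hg.1, hg.2, ?_⟩
    rw [if_neg (by norm_num)]
    by_contra hc
    push_neg at hc
    have := pvRotGe brd 4 hg.1 (fun r hr => hc r hr)
    omega
  · rw [show PySem.List.pyRange 0 2 1 = [0, 1] by decide] at hG hlt
    simp only [List.foldl_cons, List.foldl_nil] at hG hlt
    have hg1 : pvGoodB (rot_rightP brd) := pvGoodRot_imp_good _ hG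
    have hg : pvGoodB brd := pvGoodRot_imp_good brd hg1
    refine ⟨hg.1, hg.2, ?_⟩
    rw [if_pos (by norm_num)]
    by_contra hc
    push_neg at hc
    have h4 : 4 ≤ (rot_rightP (rot_rightP brd)).length := by
      apply pvRotGe _ 4 hg1.1
      intro r hr
      rw [pvRotRowLen brd r hr]
      exact hc
    omega
  · rw [show PySem.List.pyRange 0 3 1 = [0, 1, 2] by decide] at hG hlt
    simp only [List.foldl_cons, List.foldl_nil] at hG hlt
    have hg2 : pvGoodB (rot_rightP (rot_rightP brd)) := pvGoodRot_imp_good _ hG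
    have hg1 : pvGoodB (rot_rightP brd) := pvGoodRot_imp_good _ hg2
    have hg : pvGoodB brd := pvGoodRot_imp_good brd hg1
    refine ⟨hg.1, hg.2, ?_⟩
    rw [if_neg (by norm_num)]
    by_contra hc
    push_neg at hc
    have h1 : 4 ≤ (rot_rightP brd).length := pvRotGe brd 4 hg.1 (fun r hr => hc r hr)
    have h3 : 4 ≤ (rot_rightP (rot_rightP (rot_rightP brd))).length := by
      apply pvRotGe _ 4 hg2.1
      intro r hr
      rw [pvRotRowLen _ r hr]
      exact h1
    omega

theorem pvFoldRotNil (l : List Int) :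
    l.foldl (fun b _ => rot_rightP b) [] = [] := by
  induction l with
  | nil => rfl
  | cons x t ih => simp only [List.foldl_cons, pvRotNil, ih]

theorem pvKill (c : List (List (Option Int))) (hc : ¬ pvGoodB c) (x : Int) (rest : List Int) :
    (x :: rest).foldl (fun b _ => rot_rightP b) c = [] := by
  simp only [List.foldl_cons, pvRotDead c hc, pvFoldRotNil]

theorem pvCompressRowB_fst_length (arr : List (Option Int)) :
    (pvCompressRowB arr).1.length = arr.length := by
  unfold pvCompressRowB
  simp only [List.length_append, List.length_replicate]
  have h1 : (pvMergeScan (arr.filter (fun o => decide (o ≠ none)))).length ≤ arr.length :=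
    le_trans (pvMergeScan_length_le _) (List.length_filter_le _ _)
  omega

theorem pvBadNew (R : List (List (Option Int))) (hR : ¬ pvGoodB R) :
    ¬ pvGoodB (R.map (fun r => (pvCompressRowB r).1)) := by
  unfold pvGoodB at hR ⊢
  push_neg at hR ⊢
  intro hne
  have hRne : R ≠ [] := by
    intro h; rw [h] at hne; exact hne rfl
  obtain ⟨r, hr, rfl⟩ := hR hRne
  refine ⟨(pvCompressRowB []).1, List.mem_map_of_mem hr, ?_⟩
  have := pvCompressRowB_fst_length ([] : List (Option Int))
  simpa [List.length_eq_zero_iff] using this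

theorem pvRangeBack (rots : Int) :
    ∃ x rest, PySem.List.pyRange 0 (4 - PySem.Int.mod rots 4) 1 = x :: rest := by
  have hm0 : 0 ≤ PySem.Int.mod rots 4 := PySem.Int.mod_nonneg rots (by norm_num)
  have hm4 : PySem.Int.mod rots 4 < 4 := PySem.Int.mod_lt rots (by norm_num)
  have hcases : PySem.Int.mod rots 4 = 0 ∨ PySem.Int.mod rots 4 = 1 ∨
      PySem.Int.mod rots 4 = 2 ∨ PySem.Int.mod rots 4 = 3 := by omega
  rcases hcases with hm | hm | hm | hm <;> rw [hm]
  · exact ⟨0, [1, 2, 3], by decide⟩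
  · exact ⟨0, [1, 2], by decide⟩
  · exact ⟨0, [1], by decide⟩
  · exact ⟨0, [], by decide⟩

theorem pvBoardEq (brd : List (List (Option Int))) (rots : Int)
    (hpre : Pre_compress_board brd rots) :
    compress_board brd rots = compress_board_alt brd rots := by
  unfold Pre_compress_board at hpre
  obtain ⟨hpre1, hnd⟩ := hpre
  unfold compress_board compress_board_alt
  dsimp only
  set R := (PySem.List.pyRange 0 (PySem.Int.mod rots 4) 1).foldl (fun b _ => rot_rightP b) brd with hRdef
  have hlen := pvRotLen brd rots hpre1
  rw [← hRdef] at hlen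
  rw [pvMid R hlen]
  dsimp only
  have hmap : (R.map pvCompressRowB).map Prod.fst = R.map (fun r => (pvCompressRowB r).1) := by
    simp [List.map_map]
  by_cases h4 : R.length = 4
  · rw [h4]
    simp
  · have hlt : R.length < 4 := by omega
    have hbad : ¬ pvGoodB R := fun hG => hnd (pvQuirk_of_rotated brd rots (hRdef ▸ hG) (hRdef ▸ hlt))
    obtain ⟨x, rest, hrange⟩ := pvRangeBack rots
    rw [hrange]
    have hbadA : ¬ pvGoodB ((R.map pvCompressRowB).map Prod.fst ++ List.replicate (4 - R.length) ([] : List (Option Int))) := by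
      unfold pvGoodB
      push_neg
      intro _
      refine ⟨[], ?_, rfl⟩
      rw [List.mem_append]
      right
      exact List.mem_replicate.mpr ⟨by omega, rfl⟩
    have hbadB : ¬ pvGoodB ((R.map pvCompressRowB).map Prod.fst) := by
      rw [hmap]; exact pvBadNew R hbad
    rw [pvKill _ hbadA x rest, pvKill _ hbadB x rest]

-- ===== VERDICT (by name: the statement is the Claim_ definition above) =====
theorem compress_board_spec : Claim_equal_compress_board := by
  intro brd rots _ hpre
  unfold Spec_compress_board
  exact pvBoardEq brd rots hpre
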